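-- pv_equiv track=rewrite | github.com/Kureii/AffineCipher | Fce.py | IlChar
-- ===== SOURCE A (Python) =====
-- def IlChar(abc, text):
--     output = []
--     if abc.isupper():
--         text = text.upper()
--     for i in text:
--         if i not in abc:
--             output.append(i)
--     output =list(dict.fromkeys(output))
--     return output
-- ===== SOURCE B (Python) =====
-- def IlChar(abc, text):
--     if abc.isupper():
--         text = text.upper()
--     return [c for i, c in enumerate(text) if c not in abc and c not in text[:i]]
-- ===== Notes on version B (the rewrite author's own statement) =====
-- stated objective: alternative
-- what changed: A appends every non-alphabet character then deduplicates afterwards with dict.fromkeys; B builds the result in one comprehension with no auxiliary container, keeping a character exactly when it is a first occurrence, decided by scanning the already-read prefix text[:i].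
import Mathlib
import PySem

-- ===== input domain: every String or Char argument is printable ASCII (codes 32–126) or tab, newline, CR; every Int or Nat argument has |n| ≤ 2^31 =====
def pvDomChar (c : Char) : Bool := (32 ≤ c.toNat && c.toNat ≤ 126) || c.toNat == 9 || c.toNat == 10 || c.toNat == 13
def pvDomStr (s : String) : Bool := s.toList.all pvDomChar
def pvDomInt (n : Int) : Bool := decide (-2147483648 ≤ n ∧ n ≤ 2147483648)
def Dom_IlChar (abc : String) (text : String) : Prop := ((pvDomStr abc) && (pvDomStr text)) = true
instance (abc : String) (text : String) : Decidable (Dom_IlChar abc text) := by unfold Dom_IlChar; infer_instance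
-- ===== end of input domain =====

-- B replaces A's collect-then-dedup-with-dict two-phase loop by a single comprehension
-- with no auxiliary container: keep a character iff it is a first occurrence, decided by
-- scanning the already-read prefix text[:i] (alternative decomposition, same behaviour).

-- shared helper: Python str.isupper() (exact on the ASCII domain: at least one cased
-- character and no lowercase character)
def pyStrIsupper (cs : List Char) : Bool :=
  cs.any (fun c => PySem.Chars.isalpha c) && cs.all (fun c => !(PySem.Chars.islower c))

-- ===== PORT A =====
def IlChar (abc : String) (text : String) : List String :=
  PySem.List.dedup
    ((if pyStrIsupper abc.toList then PySem.Chars.upper text.toList else text.toList).foldl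
      (fun out c => if !(abc.toList.contains c) then out ++ [String.ofList [c]] else out)
      ([] : List String))

-- ===== PORT B =====
-- text[:i] with i = the (nonnegative) enumerate index is ported as List.take i.toNat,
-- exact by PySem.List.slice_to; the one-char membership tests are char membership.
def IlChar_alt (abc : String) (text : String) : List String :=
  (fun t => ((PySem.List.enumerate t 0).filter
      (fun ic => !(abc.toList.contains ic.2) && !((t.take ic.1.toNat).contains ic.2))).map
      (fun ic => String.ofList [ic.2]))
    (if pyStrIsupper abc.toList then PySem.Chars.upper text.toList else text.toList)

-- ===== PRECONDITION & SPEC =====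
def Spec_IlChar (abc : String) (text : String) (out : List String) : Prop := out = IlChar_alt abc text
instance (abc : String) (text : String) (out : List String) : Decidable (Spec_IlChar abc text out) := by unfold Spec_IlChar; infer_instance

-- ===== CLAIM (what is proved, stated in full; the proofs are below) =====
def Claim_equal_IlChar : Prop := ∀ (abc : String) (text : String), Dom_IlChar abc text → Spec_IlChar abc text (IlChar abc text)

-- ===== LEMMAS AND PROOFS =====

-- single-character strings are distinct for distinct characters
theorem ofList_single_inj {a b : Char} (h : String.ofList [a] = String.ofList [b]) : a = b := by
  have := congrArg String.toList h
  simpa using this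

-- A's collecting loop is the filtered list mapped to one-char strings
theorem ilchar_foldA (p : Char → Bool) (t : List Char) (acc : List String) :
    t.foldl (fun out c => if p c then out ++ [String.ofList [c]] else out) acc
      = acc ++ (t.filter p).map (fun c => String.ofList [c]) := by
  induction t generalizing acc with
  | nil => simp
  | cons c rest ih =>
    by_cases h : p c <;> simp [h, ih, List.append_assoc]

-- the heart of the equivalence: ordered dedup of the filtered characters equals the
-- first-occurrence filter over the enumerated text
theorem dedup_eq_firstOcc (p : Char → Bool) (t : List Char) :
    PySem.List.dedup ((t.filter p).map (fun c => String.ofList [c]))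
      = ((PySem.List.enumerate t 0).filter
          (fun ic => p ic.2 && !((t.take ic.1.toNat).contains ic.2))).map
          (fun ic => String.ofList [ic.2]) := by
  induction t using List.reverseRecOn with
  | nil => simp [PySem.List.dedup]
  | append_singleton l a ih =>
    have hfiltcong :
        (PySem.List.enumerate l 0).filter
            (fun ic => p ic.2 && !(((l ++ [a]).take ic.1.toNat).contains ic.2))
          = (PySem.List.enumerate l 0).filter
            (fun ic => p ic.2 && !((l.take ic.1.toNat).contains ic.2)) := by
      apply List.filter_congr
      intro ic hic
      rcases (PySem.List.mem_enumerate_iff _ _ _).1 hic with ⟨k, hk, hic'⟩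
      subst hic'
      have hkk : ((0 : Int) + k).toNat = k := by omega
      rw [hkk, List.take_append_of_le_length (le_of_lt hk)]
    have henum : PySem.List.enumerate (l ++ [a]) 0
        = PySem.List.enumerate l 0 ++ [((0 : Int) + l.length, a)] := by
      rw [PySem.List.enumerate_append]
      simp [PySem.List.enumerate_cons, PySem.List.enumerate_nil]
    have htake : ((l ++ [a]).take ((0 : Int) + (l.length : Int)).toNat) = l := by
      have : ((0 : Int) + (l.length : Int)).toNat = l.length := by omega
      rw [this, List.take_left]
    rw [henum]
    simp only [List.filter_append, List.map_append]
    rw [hfiltcong]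
    rw [PySem.List.dedup, PySem.Set.ofList_eq_foldl, List.foldl_append,
        ← PySem.Set.ofList_eq_foldl, ← PySem.List.dedup]
    simp only [List.filter_singleton, htake]
    by_cases hp : p a
    · rw [show (p a) = true from hp]
      by_cases hmem : a ∈ l
      · have hsmem : String.ofList [a] ∈
            PySem.List.dedup ((l.filter p).map (fun c => String.ofList [c])) := by
          rw [PySem.List.dedup, PySem.Set.mem_ofList]
          simp only [List.mem_map, List.mem_filter]
          exact ⟨a, ⟨hmem, hp⟩, rfl⟩
        have hadd : PySem.Set.add
              (PySem.List.dedup ((l.filter p).map (fun c => String.ofList [c])))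
              (String.ofList [a])
            = PySem.List.dedup ((l.filter p).map (fun c => String.ofList [c])) := by
          simp only [PySem.Set.add]
          rw [if_pos (by simpa using hsmem)]
        rw [show (l.contains a) = true by simpa using hmem]
        simp only [cond_true, cond_false, List.map_cons, List.map_nil, List.foldl_cons,
          List.foldl_nil, List.append_nil, Bool.not_true, Bool.and_false]
        rw [hadd]
        exact ih
      · have hsnmem : String.ofList [a] ∉
            PySem.List.dedup ((l.filter p).map (fun c => String.ofList [c])) := by
          rw [PySem.List.dedup, PySem.Set.mem_ofList]
          intro hc
          rcases List.mem_map.1 hc with ⟨b, hb, hba⟩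
          exact hmem ((ofList_single_inj hba) ▸ (List.mem_filter.1 hb).1)
        have hadd : PySem.Set.add
              (PySem.List.dedup ((l.filter p).map (fun c => String.ofList [c])))
              (String.ofList [a])
            = PySem.List.dedup ((l.filter p).map (fun c => String.ofList [c]))
                ++ [String.ofList [a]] := by
          simp only [PySem.Set.add]
          rw [if_neg (by simpa using hsnmem)]
        rw [show (l.contains a) = false by simpa using hmem]
        simp only [cond_true, List.map_cons, List.map_nil, List.foldl_cons,
          List.foldl_nil, Bool.not_false, Bool.and_true]
        rw [hadd, ih]
    · rw [show (p a) = false by simpa using hp]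
      simp only [cond_false, List.map_nil, List.foldl_nil, List.append_nil, Bool.false_and]
      exact ih

-- ===== VERDICT (by name: the statement is the Claim_ definition above) =====
theorem IlChar_spec : Claim_equal_IlChar := by
  intro abc text _
  unfold Spec_IlChar IlChar IlChar_alt
  rw [ilchar_foldA]
  simpa using dedup_eq_firstOcc (fun c => !(abc.toList.contains c))
    (if pyStrIsupper abc.toList then PySem.Chars.upper text.toList else text.toList)
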